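-- pv_equiv track=rewrite | github.com/cksdnde/codingtest | 프로그래머스/0/120956. 옹알이 （1）/옹알이 （1）.py | solution
-- ===== SOURCE A (Python) =====
-- def solution(babbling):
--     valid_sounds = ["aya", "ye", "woo", "ma"]
--     count = 0
--
--     for word in babbling:
--         temp_word = word
--         for sound in valid_sounds:
--             temp_word = temp_word.replace(sound, ' ')
--         if temp_word.strip() == '':
--             count += 1
--
--     return count
-- ===== SOURCE B (Python) =====
-- def _ok(word):
--     i = 0
--     n = len(word)
--     while i < n:
--         if word.startswith("aya", i):
--             i += 3
--         elif word.startswith("ye", i):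
--             i += 2
--         elif word.startswith("woo", i):
--             i += 3
--         elif word.startswith("ma", i):
--             i += 2
--         elif word[i].isspace():
--             i += 1
--         else:
--             return False
--     return True
--
--
-- def solution(babbling):
--     return sum(1 for word in babbling if _ok(word))
-- ===== Notes on version B (the rewrite author's own statement) =====
-- stated objective: alternative
-- what changed: Replaced the four whole-string replace passes plus a strip pass per word by a single left-to-right greedy token scan of each word (match aya/ye/woo/ma or skip a whitespace character), counting the words whose scan consumes them entirely.
import Mathlib
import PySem

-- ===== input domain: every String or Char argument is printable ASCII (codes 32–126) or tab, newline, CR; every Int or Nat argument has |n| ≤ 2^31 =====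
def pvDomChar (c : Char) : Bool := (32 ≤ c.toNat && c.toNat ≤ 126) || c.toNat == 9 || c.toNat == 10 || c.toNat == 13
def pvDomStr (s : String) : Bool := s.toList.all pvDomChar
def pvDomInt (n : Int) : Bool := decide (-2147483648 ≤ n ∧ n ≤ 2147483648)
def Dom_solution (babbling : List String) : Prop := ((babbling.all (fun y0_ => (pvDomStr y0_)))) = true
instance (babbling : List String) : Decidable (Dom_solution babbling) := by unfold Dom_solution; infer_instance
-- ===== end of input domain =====

-- B replaces A's four global replace passes + strip per word by one greedy left-to-right
-- token scan per word (alternative decomposition; not claimed faster).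

-- ===== PORT A =====
def solution (babbling : List String) : Int :=
  babbling.foldl (fun count word =>
    let temp_word := (["aya", "ye", "woo", "ma"] : List String).foldl
      (fun tw sound => PySem.Str.replace tw sound " ") word
    if PySem.Str.strip temp_word == "" then count + 1 else count) 0

-- ===== PORT B =====
-- Source B's while loop over an index i into word, ported as recursion on the remaining
-- character list (word.startswith(s, i) = isPrefixOf on the suffix; word[i].isspace()).
def okChars : List Char → Bool
  | [] => true
  | c :: t =>
    if List.isPrefixOf ['a', 'y', 'a'] (c :: t) then okChars (t.drop 2)
    else if List.isPrefixOf ['y', 'e'] (c :: t) then okChars (t.drop 1)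
    else if List.isPrefixOf ['w', 'o', 'o'] (c :: t) then okChars (t.drop 2)
    else if List.isPrefixOf ['m', 'a'] (c :: t) then okChars (t.drop 1)
    else if PySem.Chars.isspace c then okChars t
    else false
termination_by l => l.length
decreasing_by all_goals simp

def solution_alt (babbling : List String) : Int :=
  ((babbling.filter (fun word => okChars word.toList)).length : Int)

-- ===== PRECONDITION & SPEC =====
def Spec_solution (babbling : List String) (out : Int) : Prop := out = solution_alt babbling
instance (babbling : List String) (out : Int) : Decidable (Spec_solution babbling out) := by unfold Spec_solution; infer_instance

-- ===== CLAIM (what is proved, stated in full; the proofs are below) =====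
def Claim_equal_solution : Prop := ∀ (babbling : List String), Dom_solution babbling → Spec_solution babbling (solution babbling)

-- ===== LEMMAS AND PROOFS =====

-- Recursion-friendly form of PySem.Chars.replace for a nonempty pattern o1 :: orest.
def repP (o1 : Char) (orest new : List Char) : List Char → List Char
  | [] => []
  | c :: t =>
    if List.isPrefixOf (o1 :: orest) (c :: t) then new ++ repP o1 orest new (t.drop orest.length)
    else c :: repP o1 orest new t
termination_by l => l.length
decreasing_by all_goals simp

lemma go_eq_repP (o1 : Char) (orest new : List Char) :
    ∀ (fuel : Nat) (s acc : List Char), s.length ≤ fuel →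
      PySem.Chars.replace.go (o1 :: orest) new fuel s acc = acc.reverse ++ repP o1 orest new s := by
  intro fuel
  induction fuel with
  | zero =>
    intro s acc h
    have : s = [] := List.eq_nil_of_length_eq_zero (Nat.le_zero.mp h)
    subst this
    simp [PySem.Chars.replace.go, repP]
  | succ n ih =>
    intro s acc h
    cases s with
    | nil => simp [PySem.Chars.replace.go, repP]
    | cons c t =>
      rw [PySem.Chars.replace.go]
      by_cases hp : List.isPrefixOf (o1 :: orest) (c :: t) = true
      · rw [if_pos hp, repP, if_pos hp]
        have hlen : (t.drop orest.length).length ≤ n := by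
          simp at h ⊢; omega
        rw [show List.drop (o1 :: orest).length (c :: t) = t.drop orest.length by simp]
        rw [ih _ _ hlen]
        simp
      · rw [if_neg hp, repP, if_neg hp]
        rw [ih t (c :: acc) (by simp at h ⊢; omega)]
        simp

lemma replace_eq_repP (s : List Char) (o1 : Char) (orest new : List Char) :
    PySem.Chars.replace s (o1 :: orest) new = repP o1 orest new s := by
  rw [PySem.Chars.replace]
  simp only [List.isEmpty_cons, Bool.false_eq_true, if_false]
  simpa using go_eq_repP o1 orest new s.length s [] le_rfl

-- abbreviations for the four replaces of A, all with replacement " "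
def rA (s : List Char) : List Char := repP 'a' ['y', 'a'] [' '] s
def rY (s : List Char) : List Char := repP 'y' ['e'] [' '] s
def rW (s : List Char) : List Char := repP 'w' ['o', 'o'] [' '] s
def rM (s : List Char) : List Char := repP 'm' ['a'] [' '] s
def chain (s : List Char) : List Char := rM (rW (rY (rA s)))
def WS (s : List Char) : Bool := s.all PySem.Chars.isspace

lemma repP_nil (o1 : Char) (orest new : List Char) : repP o1 orest new [] = [] := by
  simp [repP]

lemma repP_cons_ne (o1 : Char) (orest new : List Char) (c : Char) (t : List Char)
    (h : c ≠ o1) : repP o1 orest new (c :: t) = c :: repP o1 orest new t := by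
  rw [repP, if_neg]
  simp [List.isPrefixOf]
  intro h'; exact absurd h'.symm h

lemma repP_match (o1 : Char) (orest new u : List Char) :
    repP o1 orest new (o1 :: (orest ++ u)) = new ++ repP o1 orest new u := by
  rw [repP, if_pos, List.drop_left]
  simp [List.isPrefixOf_iff_prefix]

lemma repP_cons_nomatch (o1 : Char) (orest new : List Char) (c : Char) (t : List Char)
    (h : List.isPrefixOf (o1 :: orest) (c :: t) = false) :
    repP o1 orest new (c :: t) = c :: repP o1 orest new t := by
  rw [repP, if_neg]; simp [h]

lemma repP_head (o1 : Char) (orest : List Char) (t : List Char) :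
    (repP o1 orest [' '] t).head? = some ' ' ∨ (repP o1 orest [' '] t).head? = t.head? := by
  cases t with
  | nil => right; simp [repP]
  | cons c t =>
    rw [repP]
    split
    · left; rfl
    · right; rfl

lemma strip_nil_iff (s : List Char) :
    (PySem.Chars.strip s = []) ↔ s.all PySem.Chars.isspace = true := by
  simp only [PySem.Chars.strip, PySem.Chars.rstrip, PySem.Chars.lstrip,
    List.reverse_eq_nil_iff, List.dropWhile_eq_nil_iff, List.mem_reverse, List.all_eq_true]
  constructor
  · intro h x hx
    rw [← List.takeWhile_append_dropWhile (p := PySem.Chars.isspace) (l := s)] at hx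
    rcases List.mem_append.mp hx with h1 | h2
    · exact List.mem_takeWhile_imp h1
    · exact h x h2
  · intro h x hx
    exact h x ((List.dropWhile_sublist _).subset hx)

-- specialized step lemmas for the four replaces
lemma rA_match (u : List Char) : rA ('a'::'y'::'a'::u) = ' ' :: rA u := by
  simpa [rA] using repP_match 'a' ['y','a'] [' '] u

lemma rY_match (u : List Char) : rY ('y'::'e'::u) = ' ' :: rY u := by
  simpa [rY] using repP_match 'y' ['e'] [' '] u

lemma rW_match (u : List Char) : rW ('w'::'o'::'o'::u) = ' ' :: rW u := by
  simpa [rW] using repP_match 'w' ['o','o'] [' '] u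

lemma rM_match (u : List Char) : rM ('m'::'a'::u) = ' ' :: rM u := by
  simpa [rM] using repP_match 'm' ['a'] [' '] u

lemma rA_ne (c : Char) (t : List Char) (h : c ≠ 'a') : rA (c::t) = c :: rA t :=
  repP_cons_ne _ _ _ _ _ h
lemma rY_ne (c : Char) (t : List Char) (h : c ≠ 'y') : rY (c::t) = c :: rY t :=
  repP_cons_ne _ _ _ _ _ h
lemma rW_ne (c : Char) (t : List Char) (h : c ≠ 'w') : rW (c::t) = c :: rW t :=
  repP_cons_ne _ _ _ _ _ h
lemma rM_ne (c : Char) (t : List Char) (h : c ≠ 'm') : rM (c::t) = c :: rM t :=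
  repP_cons_ne _ _ _ _ _ h

lemma prefix_head_false (ch : Char) (rest X : List Char) (h : X.head? ≠ some ch) :
    List.isPrefixOf (ch::rest) X = false := by
  cases X with
  | nil => simp [List.isPrefixOf]
  | cons c X' =>
    simp only [List.head?_cons, ne_eq, Option.some.injEq] at h
    simp only [List.isPrefixOf, Bool.and_eq_false_iff]
    exact Or.inl (beq_eq_false_iff_ne.mpr (fun hh => h hh.symm))

lemma rA_nm (t : List Char) (h : List.isPrefixOf ['y','a'] t = false) :
    rA ('a'::t) = 'a' :: rA t := by
  apply repP_cons_nomatch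
  simp [List.isPrefixOf, h]

lemma rY_nm (t : List Char) (h : t.head? ≠ some 'e') : rY ('y'::t) = 'y' :: rY t := by
  apply repP_cons_nomatch
  simp [List.isPrefixOf, prefix_head_false 'e' [] t h]

lemma rW_nm (t : List Char) (h : List.isPrefixOf ['o','o'] t = false) :
    rW ('w'::t) = 'w' :: rW t := by
  apply repP_cons_nomatch
  simp [List.isPrefixOf] at h ⊢
  exact h

lemma rM_nm (t : List Char) (h : t.head? ≠ some 'a') : rM ('m'::t) = 'm' :: rM t := by
  apply repP_cons_nomatch
  simp [List.isPrefixOf, prefix_head_false 'a' [] t h]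

lemma rA_head (s : List Char) : (rA s).head? = some ' ' ∨ (rA s).head? = s.head? :=
  repP_head _ _ s
lemma rY_head (s : List Char) : (rY s).head? = some ' ' ∨ (rY s).head? = s.head? :=
  repP_head _ _ s
lemma rW_head (s : List Char) : (rW s).head? = some ' ' ∨ (rW s).head? = s.head? :=
  repP_head _ _ s

-- heads of partial chains: either a space or the head of the original string
lemma rYA_head (s : List Char) :
    (rY (rA s)).head? = some ' ' ∨ (rY (rA s)).head? = s.head? := by
  rcases rY_head (rA s) with h | h
  · exact Or.inl h
  · rcases rA_head s with h' | h' <;> simp [h, h'] <;> tauto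

lemma rWYA_head (s : List Char) :
    (rW (rY (rA s))).head? = some ' ' ∨ (rW (rY (rA s))).head? = s.head? := by
  rcases rW_head (rY (rA s)) with h | h
  · exact Or.inl h
  · rcases rYA_head s with h' | h' <;> simp [h, h'] <;> tauto

lemma WS_cons (c : Char) (s : List Char) :
    WS (c :: s) = (PySem.Chars.isspace c && WS s) := by simp [WS]

lemma chain_nil : chain [] = [] := by simp [chain, rA, rY, rW, rM, repP_nil]

lemma isspace_a : PySem.Chars.isspace 'a' = false := by decide
lemma isspace_y : PySem.Chars.isspace 'y' = false := by decide
lemma isspace_w : PySem.Chars.isspace 'w' = false := by decide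
lemma isspace_m : PySem.Chars.isspace 'm' = false := by decide
lemma isspace_sp : PySem.Chars.isspace ' ' = true := by decide

lemma head_eq_cons {c : Char} {t : List Char} (h : t.head? = some c) : ∃ u, t = c :: u := by
  cases t with
  | nil => simp at h
  | cons d u =>
    simp only [List.head?_cons, Option.some.injEq] at h
    exact ⟨u, by rw [h]⟩

lemma chain_ok : ∀ (n : Nat) (s : List Char), s.length ≤ n → WS (chain s) = okChars s := by
  intro n
  induction n with
  | zero =>
    intro s h
    have hs : s = [] := List.eq_nil_of_length_eq_zero (Nat.le_zero.mp h)
    subst hs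
    rw [chain_nil, okChars]; rfl
  | succ n ih =>
    intro s hs
    cases s with
    | nil => rw [chain_nil, okChars]; rfl
    | cons c t =>
      simp only [List.length_cons, Nat.add_le_add_iff_right] at hs
      by_cases ha : c = 'a'
      · subst ha
        by_cases hp : List.isPrefixOf ['y','a'] t = true
        · obtain ⟨u, rfl⟩ : ∃ u, t = 'y'::'a'::u := by
            obtain ⟨u, hu⟩ := List.isPrefixOf_iff_prefix.mp hp
            exact ⟨u, by simpa using hu.symm⟩
          have h2 : chain ('a'::'y'::'a'::u) = ' ' :: chain u := by
            rw [chain, rA_match, rY_ne ' ' _ (by decide), rW_ne ' ' _ (by decide),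
              rM_ne ' ' _ (by decide)]
            simp only [chain]
          rw [h2, WS_cons, isspace_sp, Bool.true_and,
            ih u (by simp at hs; omega), okChars]
          simp [List.isPrefixOf]
        · replace hp : List.isPrefixOf ['y','a'] t = false := Bool.eq_false_iff.mpr hp
          have h2 : chain ('a'::t) = 'a' :: chain t := by
            rw [chain, rA_nm t hp, rY_ne 'a' _ (by decide), rW_ne 'a' _ (by decide),
              rM_ne 'a' _ (by decide)]
            simp only [chain]
          rw [h2, WS_cons, isspace_a, Bool.false_and, okChars]
          simp [List.isPrefixOf, hp, isspace_a]
      · by_cases hy : c = 'y'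
        · subst hy
          by_cases hte : t.head? = some 'e'
          · obtain ⟨u, rfl⟩ := head_eq_cons hte
            have h2 : chain ('y'::'e'::u) = ' ' :: chain u := by
              rw [chain, rA_ne 'y' _ (by decide), rA_ne 'e' _ (by decide), rY_match,
                rW_ne ' ' _ (by decide), rM_ne ' ' _ (by decide)]
              simp only [chain]
            rw [h2, WS_cons, isspace_sp, Bool.true_and,
              ih u (by simp at hs; omega), okChars]
            simp [List.isPrefixOf]
          · have hAh : (rA t).head? ≠ some 'e' := by
              rcases rA_head t with h | h <;> rw [h] <;> simp_all
            have h2 : chain ('y'::t) = 'y' :: chain t := by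
              rw [chain, rA_ne 'y' _ (by decide), rY_nm _ hAh, rW_ne 'y' _ (by decide),
                rM_ne 'y' _ (by decide)]
              simp only [chain]
            rw [h2, WS_cons, isspace_y, Bool.false_and, okChars]
            simp [List.isPrefixOf, prefix_head_false 'e' [] t hte, isspace_y]
        · by_cases hw : c = 'w'
          · subst hw
            by_cases hoo : List.isPrefixOf ['o','o'] t = true
            · obtain ⟨v, rfl⟩ : ∃ v, t = 'o'::'o'::v := by
                obtain ⟨v, hv⟩ := List.isPrefixOf_iff_prefix.mp hoo
                exact ⟨v, by simpa using hv.symm⟩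
              have h2 : chain ('w'::'o'::'o'::v) = ' ' :: chain v := by
                rw [chain, rA_ne 'w' _ (by decide), rA_ne 'o' _ (by decide),
                  rA_ne 'o' _ (by decide), rY_ne 'w' _ (by decide), rY_ne 'o' _ (by decide),
                  rY_ne 'o' _ (by decide), rW_match, rM_ne ' ' _ (by decide)]
                simp only [chain]
              rw [h2, WS_cons, isspace_sp, Bool.true_and,
                ih v (by simp at hs; omega), okChars]
              simp [List.isPrefixOf]
            · replace hoo : List.isPrefixOf ['o','o'] t = false := Bool.eq_false_iff.mpr hoo
              have key : List.isPrefixOf ['o','o'] (rY (rA t)) = false := by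
                by_cases hto : t.head? = some 'o'
                · obtain ⟨u, rfl⟩ := head_eq_cons hto
                  have hu : u.head? ≠ some 'o' := by
                    intro h
                    obtain ⟨v, rfl⟩ := head_eq_cons h
                    simp [List.isPrefixOf] at hoo
                  rw [rA_ne 'o' _ (by decide), rY_ne 'o' _ (by decide)]
                  have hk : (rY (rA u)).head? ≠ some 'o' := by
                    rcases rYA_head u with h | h <;> rw [h] <;> simp_all
                  simp [List.isPrefixOf, prefix_head_false 'o' [] _ hk]
                · exact prefix_head_false 'o' ['o'] _ (by
                    rcases rYA_head t with h | h <;> rw [h] <;> simp_all)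
              have h2 : chain ('w'::t) = 'w' :: chain t := by
                rw [chain, rA_ne 'w' _ (by decide), rY_ne 'w' _ (by decide), rW_nm _ key,
                  rM_ne 'w' _ (by decide)]
                simp only [chain]
              rw [h2, WS_cons, isspace_w, Bool.false_and, okChars]
              simp [List.isPrefixOf, hoo, isspace_w]
          · by_cases hm : c = 'm'
            · subst hm
              by_cases hta : t.head? = some 'a'
              · obtain ⟨u, rfl⟩ := head_eq_cons hta
                by_cases hp : List.isPrefixOf ['y','a'] u = true
                · obtain ⟨v, rfl⟩ : ∃ v, u = 'y'::'a'::v := by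
                    obtain ⟨v, hv⟩ := List.isPrefixOf_iff_prefix.mp hp
                    exact ⟨v, by simpa using hv.symm⟩
                  have h2 : chain ('m'::'a'::'y'::'a'::v) = 'm' :: ' ' :: chain v := by
                    rw [chain, rA_ne 'm' _ (by decide), rA_match, rY_ne 'm' _ (by decide),
                      rY_ne ' ' _ (by decide), rW_ne 'm' _ (by decide), rW_ne ' ' _ (by decide),
                      rM_nm _ (by simp), rM_ne ' ' _ (by decide)]
                    simp only [chain]
                  rw [h2, WS_cons, isspace_m, Bool.false_and]
                  have hya : okChars ('y'::'a'::v) = false := by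
                    rw [okChars]; simp [List.isPrefixOf, isspace_y]
                  rw [okChars]
                  simp [List.isPrefixOf, hya]
                · replace hp : List.isPrefixOf ['y','a'] u = false := Bool.eq_false_iff.mpr hp
                  have h2 : chain ('m'::'a'::u) = ' ' :: chain u := by
                    rw [chain, rA_ne 'm' _ (by decide), rA_nm u hp, rY_ne 'm' _ (by decide),
                      rY_ne 'a' _ (by decide), rW_ne 'm' _ (by decide), rW_ne 'a' _ (by decide),
                      rM_match]
                    simp only [chain]
                  rw [h2, WS_cons, isspace_sp, Bool.true_and,
                    ih u (by simp at hs; omega), okChars]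
                  simp [List.isPrefixOf]
              · have hWh : (rW (rY (rA t))).head? ≠ some 'a' := by
                  rcases rWYA_head t with h | h <;> rw [h] <;> simp_all
                have h2 : chain ('m'::t) = 'm' :: chain t := by
                  rw [chain, rA_ne 'm' _ (by decide), rY_ne 'm' _ (by decide),
                    rW_ne 'm' _ (by decide), rM_nm _ hWh]
                  simp only [chain]
                rw [h2, WS_cons, isspace_m, Bool.false_and, okChars]
                simp [List.isPrefixOf, prefix_head_false 'a' [] t hta, isspace_m]
            · have h2 : chain (c::t) = c :: chain t := by
                rw [chain, rA_ne c _ ha, rY_ne c _ hy, rW_ne c _ hw, rM_ne c _ hm]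
                simp only [chain]
              rw [h2, WS_cons, okChars]
              have e1 : List.isPrefixOf ['a','y','a'] (c::t) = false :=
                prefix_head_false _ _ _ (by simp [ha])
              have e2 : List.isPrefixOf ['y','e'] (c::t) = false :=
                prefix_head_false _ _ _ (by simp [hy])
              have e3 : List.isPrefixOf ['w','o','o'] (c::t) = false :=
                prefix_head_false _ _ _ (by simp [hw])
              have e4 : List.isPrefixOf ['m','a'] (c::t) = false :=
                prefix_head_false _ _ _ (by simp [hm])
              rw [e1, e2, e3, e4]
              simp only [Bool.false_eq_true, if_false]
              by_cases hsp : PySem.Chars.isspace c = true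
              · rw [hsp, Bool.true_and, if_pos rfl, ih t hs]
              · replace hsp : PySem.Chars.isspace c = false := Bool.eq_false_iff.mpr hsp
                rw [hsp, Bool.false_and, if_neg (by simp)]

-- A's per-word test equals B's per-word scan
lemma condA_eq (word : String) :
    (PySem.Str.strip ((["aya", "ye", "woo", "ma"] : List String).foldl
        (fun tw sound => PySem.Str.replace tw sound " ") word) == "")
      = okChars word.toList := by
  simp only [List.foldl_cons, List.foldl_nil]
  rw [Bool.eq_iff_iff, beq_iff_eq, ← String.toList_eq_nil_iff]
  rw [PySem.Str.toList_strip]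
  simp only [PySem.Str.toList_replace]
  rw [show ("aya" : String).toList = ['a','y','a'] from rfl,
    show ("ye" : String).toList = ['y','e'] from rfl,
    show ("woo" : String).toList = ['w','o','o'] from rfl,
    show ("ma" : String).toList = ['m','a'] from rfl,
    show (" " : String).toList = [' '] from rfl]
  rw [replace_eq_repP, replace_eq_repP, replace_eq_repP, replace_eq_repP]
  rw [show repP 'm' ['a'] [' ']
        (repP 'w' ['o','o'] [' '] (repP 'y' ['e'] [' '] (repP 'a' ['y','a'] [' '] word.toList)))
      = chain word.toList from rfl]
  rw [strip_nil_iff]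
  rw [show (chain word.toList).all PySem.Chars.isspace = WS (chain word.toList) from rfl]
  rw [chain_ok word.toList.length word.toList le_rfl]

lemma foldl_count (l : List String) (c : Int) :
    l.foldl (fun count word =>
      let temp_word := (["aya", "ye", "woo", "ma"] : List String).foldl
        (fun tw sound => PySem.Str.replace tw sound " ") word
      if PySem.Str.strip temp_word == "" then count + 1 else count) c
    = c + ((l.filter (fun word => okChars word.toList)).length : Int) := by
  induction l generalizing c with
  | nil => simp
  | cons w l ihl =>
    rw [List.foldl_cons, ihl]
    show (if (PySem.Str.strip _ == "") = true then c + 1 else c) + _ = _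
    rw [condA_eq w, List.filter_cons]
    by_cases h : okChars w.toList = true
    · rw [if_pos h, if_pos h, List.length_cons]
      push_cast
      ring
    · rw [if_neg h, if_neg h]

theorem solution_spec : Claim_equal_solution := by
  intro babbling _
  unfold Spec_solution solution solution_alt
  rw [foldl_count babbling 0, zero_add]
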